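-- pv_equiv track=rewrite | github.com/Dilli822/Coding-Challenges | 100DaysOfCoding/Month3/Day77/day77.py | bag_of_words
-- ===== SOURCE A (Python) =====
-- def bag_of_words(text):
--     words = text.lower().split(" ")
--     bag = {}  # stores all of the encodings and their frequency
--     vocab = {}  # stores word to encoding mapping
--     word_encoding = 1  # starting encoding
--
--     for word in words:
--         if word in vocab:
--             encoding = vocab[word]
--         else:
--             vocab[word] = word_encoding
--             encoding = word_encoding
--             word_encoding += 1
--         if encoding in bag:
--             bag[encoding] += 1
--         else:
--             bag[encoding] = 1
--
--     return bag, vocab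
-- ===== SOURCE B (Python) =====
-- def bag_of_words(text):
--     # Pass 1: tally word frequencies (dict preserves first-appearance order).
--     counts = {}
--     for word in text.lower().split(" "):
--         counts[word] = counts.get(word, 0) + 1
--     # Pass 2: number the distinct words 1..n and emit both maps.
--     bag = {}
--     vocab = {}
--     for i, (word, count) in enumerate(counts.items(), 1):
--         vocab[word] = i
--         bag[i] = count
--     return bag, vocab
-- ===== Notes on version B (the rewrite author's own statement) =====
-- stated objective: idiomatic
-- what changed: Replaces the interleaved encode-and-count loop holding three pieces of state with a count-first pass (a plain frequency dict) followed by a single enumerate pass over the distinct words that assigns encodings 1..n and emits both maps.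
import Mathlib
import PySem

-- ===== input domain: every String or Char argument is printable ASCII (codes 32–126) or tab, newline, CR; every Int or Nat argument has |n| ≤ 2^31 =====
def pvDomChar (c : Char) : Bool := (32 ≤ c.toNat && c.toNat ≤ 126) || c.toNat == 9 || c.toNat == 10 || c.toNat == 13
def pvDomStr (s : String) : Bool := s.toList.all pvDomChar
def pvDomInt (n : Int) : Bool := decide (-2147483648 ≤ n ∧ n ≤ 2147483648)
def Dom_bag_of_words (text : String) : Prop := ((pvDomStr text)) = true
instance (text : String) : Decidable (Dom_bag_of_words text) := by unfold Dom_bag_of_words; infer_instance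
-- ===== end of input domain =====

-- B replaces A's interleaved encode-and-count loop by a count-first pass plus one
-- enumerate pass over the distinct words; same values, proved equal on all inputs.

-- ===== PORT A =====
-- one iteration of A's for-loop: state = (bag, vocab, word_encoding)
def bowStepA (st : PySem.Dict Int Int × PySem.Dict String Int × Int) (word : String) :
    PySem.Dict Int Int × PySem.Dict String Int × Int :=
  let bag := st.1
  let vocab := st.2.1
  let word_encoding := st.2.2
  let va : PySem.Dict String Int × Int × Int :=
    match vocab.get? word with
    | some e => (vocab, e, word_encoding)
    | none => (vocab.insert word word_encoding, word_encoding, word_encoding + 1)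
  let vocab' := va.1
  let encoding := va.2.1
  let we' := va.2.2
  let bag' :=
    match bag.get? encoding with
    | some c => bag.insert encoding (c + 1)
    | none => bag.insert encoding 1
  (bag', vocab', we')

def bag_of_words (text : String) : (List (Int × Int)) × (List (String × Int)) :=
  -- text.lower().split(" "): sep is the nonempty literal " ", so split? is always `some`
  let words : List String := (PySem.Str.split? (PySem.Str.lower text) " ").getD []
  let res := words.foldl bowStepA (PySem.Dict.empty, PySem.Dict.empty, 1)
  (res.1.items, res.2.1.items)

-- ===== PORT B =====
def bag_of_words_alt (text : String) : (List (Int × Int)) × (List (String × Int)) :=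
  -- text.lower().split(" "): sep is the nonempty literal " ", so split? is always `some`
  let words : List String := (PySem.Str.split? (PySem.Str.lower text) " ").getD []
  -- pass 1: counts[word] = counts.get(word, 0) + 1
  let counts := words.foldl (fun (d : PySem.Dict String Int) w => d.insert w (d.getD w 0 + 1))
    PySem.Dict.empty
  -- pass 2: for i, (word, count) in enumerate(counts.items(), 1): vocab[word] = i; bag[i] = count
  let res := (PySem.List.enumerate counts.items 1).foldl
      (fun (st : PySem.Dict Int Int × PySem.Dict String Int) p =>
        (st.1.insert p.1 p.2.2, st.2.insert p.2.1 p.1))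
      (PySem.Dict.empty, PySem.Dict.empty)
  (res.1.items, res.2.items)

-- ===== PRECONDITION & SPEC =====
def Spec_bag_of_words (text : String) (out : (List (Int × Int)) × (List (String × Int))) : Prop := out = bag_of_words_alt text
instance (text : String) (out : (List (Int × Int)) × (List (String × Int))) : Decidable (Spec_bag_of_words text out) := by unfold Spec_bag_of_words; infer_instance

-- ===== CLAIM (what is proved, stated in full; the proofs are below) =====
def Claim_equal_bag_of_words : Prop := ∀ (text : String), Dom_bag_of_words text → Spec_bag_of_words text (bag_of_words text)

-- ===== LEMMAS AND PROOFS =====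

-- canonical vocab/bag dictionaries for a processed prefix `pre` with distinct words `ds`
def bowVocab (ds : List String) : PySem.Dict String Int :=
  PySem.Dict.mk ((PySem.List.enumerate ds 1).map (fun p => (p.2, p.1)))

def bowBag (ds : List String) (pre : List String) : PySem.Dict Int Int :=
  PySem.Dict.mk ((PySem.List.enumerate ds 1).map (fun p => (p.1, (pre.count p.2 : Int))))

def bowState (pre : List String) : PySem.Dict Int Int × PySem.Dict String Int × Int :=
  (bowBag (PySem.Set.ofList pre) pre, bowVocab (PySem.Set.ofList pre),
    ((PySem.Set.ofList pre).length : Int) + 1)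

theorem enumerate_map {α β : Type} (f : α → β) (xs : List α) (s : Int) :
    PySem.List.enumerate (xs.map f) s
      = (PySem.List.enumerate xs s).map (fun p => (p.1, f p.2)) := by
  induction xs generalizing s with
  | nil => simp [PySem.List.enumerate_nil]
  | cons x t ih => simp [PySem.List.enumerate_cons, ih]


theorem keys_bowVocab (ds : List String) : (bowVocab ds).keys = ds := by
  simp [bowVocab, PySem.Dict.keys, List.map_map, Function.comp_def, PySem.List.map_snd_enumerate]

theorem keys_bowBag (ds pre : List String) :
    (bowBag ds pre).keys = PySem.List.pyRange 1 (1 + ds.length) 1 := by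
  simp [bowBag, PySem.Dict.keys, List.map_map, Function.comp_def, PySem.List.map_fst_enumerate]

theorem count_append_singleton {α : Type} [BEq α] [LawfulBEq α] (pre : List α) (w x : α) :
    (pre ++ [w]).count x = pre.count x + if x == w then 1 else 0 := by
  by_cases h : x = w
  · simp [List.count_append, List.count_singleton, h]
  · simp [List.count_append, List.count_singleton, h, Ne.symm h]

theorem bowStepA_state (pre : List String) (w : String) :
    bowStepA (bowState pre) w = bowState (pre ++ [w]) := by
  have hnd : (PySem.Set.ofList pre).Nodup := PySem.Set.nodup_ofList pre
  by_cases hw : w ∈ pre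
  case pos =>
    -- ofList (pre ++ [w]) = ofList pre
    have hwD : w ∈ PySem.Set.ofList pre := by simp [PySem.Set.mem_ofList, hw]
    have hD : PySem.Set.ofList (pre ++ [w]) = PySem.Set.ofList pre := by
      rw [PySem.Set.ofList_append_singleton]
      simp [PySem.Set.add_eq_ite, hwD]
    obtain ⟨k, hk, hDk⟩ := List.mem_iff_getElem.mp hwD
    -- vocab lookup returns the encoding 1 + k
    have hmemE : ((1 : Int) + (k : Int), (PySem.Set.ofList pre)[k]) ∈
        PySem.List.enumerate (PySem.Set.ofList pre) 1 := by
      rw [PySem.List.mem_enumerate_iff]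
      exact ⟨k, hk, rfl⟩
    have hvget : (bowVocab (PySem.Set.ofList pre)).get? w = some (1 + (k : Int)) := by
      apply PySem.Dict.get?_of_mem_items
      · show (w, 1 + (k : Int)) ∈ (PySem.List.enumerate (PySem.Set.ofList pre) 1).map _
        refine List.mem_map.mpr ⟨(1 + (k : Int), (PySem.Set.ofList pre)[k]), hmemE, ?_⟩
        simp [hDk]
      · rw [keys_bowVocab]; exact hnd
    have hbget : (bowBag (PySem.Set.ofList pre) pre).get? (1 + (k : Int))
        = some ((pre.count w : Int)) := by
      apply PySem.Dict.get?_of_mem_items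
      · show (1 + (k : Int), (pre.count w : Int)) ∈
          (PySem.List.enumerate (PySem.Set.ofList pre) 1).map _
        refine List.mem_map.mpr ⟨(1 + (k : Int), (PySem.Set.ofList pre)[k]), hmemE, ?_⟩
        simp [hDk]
      · rw [keys_bowBag]; exact PySem.List.nodup_pyRange_one _ _
    have hcontains : (bowBag (PySem.Set.ofList pre) pre).contains (1 + (k : Int)) = true := by
      rw [PySem.Dict.contains_iff_mem_keys, keys_bowBag, PySem.List.mem_pyRange_one]
      constructor <;> [omega; (push_cast; omega)]
    unfold bowStepA bowState
    rw [hD]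
    dsimp only
    rw [hvget]
    dsimp only
    rw [hbget]
    dsimp only
    refine Prod.ext ?_ rfl
    -- the bag: the entry at key 1 + k is bumped by one
    apply PySem.Dict.ext
    rw [PySem.Dict.items_insert_of_contains _ _ hcontains]
    show ((PySem.List.enumerate (PySem.Set.ofList pre) 1).map _).map _ = _
    rw [List.map_map]
    apply List.map_congr_left
    intro p hp
    obtain ⟨j, hj, rfl⟩ := (PySem.List.mem_enumerate_iff _ _ _).mp hp
    simp only [Function.comp_def]
    by_cases hjk : j = k
    · subst hjk
      have ht : ((1 : Int) + (j : Int) == 1 + (j : Int)) = true := by simp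
      simp [ht, count_append_singleton, hDk]
    · have hne : ((1 : Int) + (j : Int) == 1 + (k : Int)) = false := by
        simp only [beq_eq_false_iff_ne, ne_eq]
        intro hcontra
        exact hjk (by omega)
      have hnw : ((PySem.Set.ofList pre)[j] == w) = false := by
        simp only [beq_eq_false_iff_ne, ne_eq]
        rw [← hDk]
        exact fun h => hjk ((List.Nodup.getElem_inj_iff hnd).mp h)
      have hne' : (PySem.Set.ofList pre)[j] ≠ w := by simpa using hnw
      simp [hne, hne']
      exact List.count_eq_zero.mpr (by simp [hne'])
  case neg =>
    have hwD : w ∉ PySem.Set.ofList pre := by simp [PySem.Set.mem_ofList, hw]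
    have hD : PySem.Set.ofList (pre ++ [w]) = PySem.Set.ofList pre ++ [w] := by
      rw [PySem.Set.ofList_append_singleton]
      simp [PySem.Set.add_eq_ite, hwD]
    have hvget : (bowVocab (PySem.Set.ofList pre)).get? w = none := by
      rw [PySem.Dict.get?_eq_none_iff_not_mem_keys, keys_bowVocab]; exact hwD
    have hbget : (bowBag (PySem.Set.ofList pre) pre).get?
        (((PySem.Set.ofList pre).length : Int) + 1) = none := by
      rw [PySem.Dict.get?_eq_none_iff_not_mem_keys, keys_bowBag, PySem.List.mem_pyRange_one]
      omega
    have hvcont : (bowVocab (PySem.Set.ofList pre)).contains w = false := by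
      rw [← Bool.not_eq_true, PySem.Dict.contains_iff_mem_keys, keys_bowVocab]
      exact hwD
    have hbcont : (bowBag (PySem.Set.ofList pre) pre).contains
        (((PySem.Set.ofList pre).length : Int) + 1) = false := by
      rw [← Bool.not_eq_true, PySem.Dict.contains_iff_mem_keys, keys_bowBag,
        PySem.List.mem_pyRange_one]
      omega
    have hcount0 : pre.count w = 0 := List.count_eq_zero.mpr hw
    unfold bowStepA bowState
    rw [hD]
    dsimp only
    rw [hvget]
    dsimp only
    rw [hbget]
    dsimp only
    refine Prod.ext ?_ (Prod.ext ?_ ?_)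
    · -- bag gains the fresh entry (n + 1, 1) at the end
      apply PySem.Dict.ext
      rw [PySem.Dict.items_insert_of_not_contains _ _ hbcont]
      show (PySem.List.enumerate (PySem.Set.ofList pre) 1).map
            (fun p => (p.1, ((pre.count p.2 : Int)))) ++ _
          = (PySem.List.enumerate (PySem.Set.ofList pre ++ [w]) 1).map
            (fun p => (p.1, (((pre ++ [w]).count p.2 : Int))))
      rw [PySem.List.enumerate_append]
      rw [List.map_append]
      congr 1
      · apply List.map_congr_left
        intro p hp
        obtain ⟨j, hj, rfl⟩ := (PySem.List.mem_enumerate_iff _ _ _).mp hp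
        have hne' : (PySem.Set.ofList pre)[j] ≠ w := by
          intro h
          exact hwD (h ▸ List.getElem_mem hj)
        simp [hne']
        exact List.count_eq_zero.mpr (by simp [hne'])
      · simp [PySem.List.enumerate_cons, PySem.List.enumerate_nil,
          count_append_singleton, hcount0, add_comm]
    · -- vocab gains (w, n + 1) at the end
      apply PySem.Dict.ext
      rw [PySem.Dict.items_insert_of_not_contains _ _ hvcont]
      show (PySem.List.enumerate (PySem.Set.ofList pre) 1).map (fun p => (p.2, p.1)) ++ _
          = (PySem.List.enumerate (PySem.Set.ofList pre ++ [w]) 1).map (fun p => (p.2, p.1))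
      rw [PySem.List.enumerate_append, List.map_append]
      congr 1
      simp [PySem.List.enumerate_cons, PySem.List.enumerate_nil, add_comm]
    · -- the next encoding
      show ((PySem.Set.ofList pre).length : Int) + 1 + 1
          = (((PySem.Set.ofList pre ++ [w]).length : Nat) : Int) + 1
      simp [List.length_append]

theorem bowA_loop (ws pre : List String) :
    ws.foldl bowStepA (bowState pre) = bowState (pre ++ ws) := by
  induction ws generalizing pre with
  | nil => simp
  | cons x t ih =>
      simp only [List.foldl_cons, bowStepA_state, ih]
      simp

theorem bowB_counts (ws : List String) :
    (ws.foldl (fun (d : PySem.Dict String Int) w => d.insert w (d.getD w 0 + 1))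
        PySem.Dict.empty).items
      = (PySem.Set.ofList ws).map (fun k => (k, (ws.count k : Int))) := by
  rw [PySem.Dict.foldl_insert_getD_add_one_eq_counter, PySem.Dict.items_counter]

theorem bag_of_words_eq (text : String) : bag_of_words text = bag_of_words_alt text := by
  unfold bag_of_words bag_of_words_alt
  dsimp only
  generalize (PySem.Str.split? (PySem.Str.lower text) " ").getD [] = ws
  rw [bowB_counts ws, enumerate_map]
  rw [PySem.List.foldl_prod_mk
    (f := fun (d : PySem.Dict Int Int) (p : Int × String × Int) => d.insert p.1 p.2.2)
    (g := fun (d : PySem.Dict String Int) (p : Int × String × Int) => d.insert p.2.1 p.1)]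
  rw [show ((PySem.Dict.empty : PySem.Dict Int Int), (PySem.Dict.empty : PySem.Dict String Int),
      (1 : Int)) = bowState [] from rfl, bowA_loop]
  dsimp only
  have hE : ∀ (L : List (Int × String × Int)) (hfst : (L.map (fun p => p.1)).Nodup),
      (L.foldl (fun (d : PySem.Dict Int Int) p => d.insert p.1 p.2.2) PySem.Dict.empty).items
        = L.map (fun p => (p.1, p.2.2)) := by
    intro L hfst
    rw [PySem.Dict.items_foldl_insert_fresh (k := fun p => p.1) (v := fun p => p.2.2)
      (d := PySem.Dict.empty) L (by intro a _; simp [PySem.Dict.contains_empty]) hfst]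
    simp [PySem.Dict.empty]
  have hV : ∀ (L : List (Int × String × Int)) (hfst : (L.map (fun p => p.2.1)).Nodup),
      (L.foldl (fun (d : PySem.Dict String Int) p => d.insert p.2.1 p.1) PySem.Dict.empty).items
        = L.map (fun p => (p.2.1, p.1)) := by
    intro L hfst
    rw [PySem.Dict.items_foldl_insert_fresh (k := fun p => p.2.1) (v := fun p => p.1)
      (d := PySem.Dict.empty) L (by intro a _; simp [PySem.Dict.contains_empty]) hfst]
    simp [PySem.Dict.empty]
  rw [hE _ (by
        rw [List.map_map]
        have : ((fun (p : Int × String × Int) => p.1) ∘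
            (fun (p : Int × String) => (p.1, p.2, (ws.count p.2 : Int)))) = fun p => p.1 := rfl
        rw [this, PySem.List.map_fst_enumerate]
        exact PySem.List.nodup_pyRange_one _ _),
      hV _ (by
        rw [List.map_map]
        have : ((fun (p : Int × String × Int) => p.2.1) ∘
            (fun (p : Int × String) => (p.1, p.2, (ws.count p.2 : Int)))) = fun p => p.2 := rfl
        rw [this, PySem.List.map_snd_enumerate]
        exact PySem.Set.nodup_ofList ws)]
  unfold bowState bowBag bowVocab
  simp only [List.nil_append, List.map_map]
  exact Prod.ext rfl rfl

-- ===== VERDICT (by name: the statement is the Claim_ definition above) =====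
theorem bag_of_words_spec : Claim_equal_bag_of_words := by
  intro text _
  unfold Spec_bag_of_words
  exact bag_of_words_eq text
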